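-- pv_equiv track=rewrite | github.com/ElPlaguister/Def-DTS | src/autoseg.py | extract_label
-- ===== SOURCE A (Python) =====
-- from typing import List
--
-- def extract_label(dialogue: List[str], return_output: bool = False) -> List[int]:
--     boundary = [0]
--     output = []
--     toggle = False
--     for utterance in dialogue:
--         if utterance == '[BOUNDARY]':
--             boundary.append(0)
--             toggle = True
--         else:
--             boundary[-1]+=1
--             output.append(toggle)
--             toggle = False
--
--     if return_output: return (boundary, output)
--     return boundary
-- ===== SOURCE B (Python) =====
-- from typing import List
--
-- def extract_label(dialogue: List[str], return_output: bool = False) -> List[int]: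
--     # Segment lengths from boundary-marker positions: adjacent-index differences,
--     # with sentinels -1 before the front and len(dialogue) after the back.
--     pos = [-1] + [i for i, u in enumerate(dialogue) if u == '[BOUNDARY]'] + [len(dialogue)]
--     boundary = [b - a - 1 for a, b in zip(pos, pos[1:])]
--     if return_output:
--         output = [i > 0 and dialogue[i - 1] == '[BOUNDARY]'
--                   for i, u in enumerate(dialogue) if u != '[BOUNDARY]']
--         return (boundary, output)
--     return boundary
-- ===== Notes on version B (the rewrite author's own statement) =====
-- stated objective: alternative
-- what changed: Replaces A's running-counter loop with a toggle and in-place increment of the last segment by arithmetic on the marker positions: collect the indices of '[BOUNDARY]' markers, add sentinels -1 and len(dialogue), and take adjacent-index differences minus one.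
import Mathlib
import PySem

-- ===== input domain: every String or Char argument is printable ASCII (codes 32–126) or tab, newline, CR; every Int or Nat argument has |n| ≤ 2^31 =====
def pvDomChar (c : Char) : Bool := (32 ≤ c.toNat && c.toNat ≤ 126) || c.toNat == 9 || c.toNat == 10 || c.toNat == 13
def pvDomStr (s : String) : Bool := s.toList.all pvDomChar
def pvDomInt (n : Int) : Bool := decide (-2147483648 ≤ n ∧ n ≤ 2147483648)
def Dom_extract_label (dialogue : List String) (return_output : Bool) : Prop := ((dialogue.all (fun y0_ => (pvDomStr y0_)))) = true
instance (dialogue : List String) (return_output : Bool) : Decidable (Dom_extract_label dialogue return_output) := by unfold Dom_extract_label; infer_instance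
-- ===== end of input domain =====

-- B replaces A's running-counter/toggle loop by arithmetic on the marker positions
-- (adjacent-index differences with sentinels); objective: alternative decomposition.
-- Pre_ restricts to return_output = false, where both Pythons return a List[int].

-- ===== PORT A =====
-- boundary[-1] += 1
def pvIncLast : List Int → List Int
  | [] => []
  | [x] => [x + 1]
  | x :: y :: xs => x :: pvIncLast (y :: xs)

-- loop body of A: state (boundary, output, toggle)
def pvStepA (st : List Int × List Bool × Bool) (u : String) : List Int × List Bool × Bool :=
  if u = "[BOUNDARY]" then (st.1 ++ [(0 : Int)], st.2.1, true)
  else (pvIncLast st.1, st.2.1 ++ [st.2.2], false)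

-- return_output = true (a tuple return in Python) is outside Pre_; boundary is returned.
def extract_label (dialogue : List String) (return_output : Bool) : List Int :=
  (dialogue.foldl pvStepA ([(0 : Int)], [], false)).1

-- ===== PORT B =====
-- [i for i, u in enumerate(dialogue) if u == '[BOUNDARY]'], indices starting at k
def pvMarkerIdx (dialogue : List String) (k : Nat) : List Int :=
  (dialogue.zipIdx k).filterMap (fun p => if p.1 = "[BOUNDARY]" then some (p.2 : Int) else none)

-- [b - a - 1 for a, b in zip(pos, pos[1:])]
def pvDiffs (l : List Int) : List Int :=
  (l.zip l.tail).map (fun p => p.2 - p.1 - 1)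

def extract_label_alt (dialogue : List String) (return_output : Bool) : List Int :=
  pvDiffs ((-1 : Int) :: pvMarkerIdx dialogue 0 ++ [(dialogue.length : Int)])

-- ===== PRECONDITION & SPEC =====
-- Pre_ excludes return_output = true, on which A returns a (boundary, output) tuple,
-- not a value of the declared List[int] type.
def Pre_extract_label (dialogue : List String) (return_output : Bool) : Prop :=
  return_output = false
instance (dialogue : List String) (return_output : Bool) : Decidable (Pre_extract_label dialogue return_output) := by unfold Pre_extract_label; infer_instance

def pvWitness_extract_label : List String × Bool := (["a", "[BOUNDARY]", "b", "c"], false)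

def Spec_extract_label (dialogue : List String) (return_output : Bool) (out : List Int) : Prop := out = extract_label_alt dialogue return_output
instance (dialogue : List String) (return_output : Bool) (out : List Int) : Decidable (Spec_extract_label dialogue return_output out) := by unfold Spec_extract_label; infer_instance

-- ===== CLAIM =====
def Claim_equal_extract_label : Prop := ∀ (dialogue : List String) (return_output : Bool), Dom_extract_label dialogue return_output → Pre_extract_label dialogue return_output → Spec_extract_label dialogue return_output (extract_label dialogue return_output)

-- ===== LEMMAS AND PROOFS =====

-- reference recursive form of the segment-length list
def pvAddFirst (x : Int) : List Int → List Int
  | [] => [x]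
  | h :: t => (x + h) :: t

def pvG : List String → List Int
  | [] => [0]
  | u :: rest => if u = "[BOUNDARY]" then 0 :: pvG rest else pvAddFirst 1 (pvG rest)

-- the boundary-only loop body of A
def pvStepB (b : List Int) (u : String) : List Int :=
  if u = "[BOUNDARY]" then b ++ [(0 : Int)] else pvIncLast b

theorem pvFoldA_fst (us : List String) : ∀ (b : List Int) (out : List Bool) (t : Bool),
    (us.foldl pvStepA (b, out, t)).1 = us.foldl pvStepB b := by
  induction us with
  | nil => intro b out t; rfl
  | cons u rest ih =>
    intro b out t
    simp only [List.foldl, pvStepA, pvStepB]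
    by_cases h : u = "[BOUNDARY]" <;> simp [h, ih]

theorem pvIncLast_ne_nil (b : List Int) (h : b ≠ []) : pvIncLast b ≠ [] := by
  cases b with
  | nil => exact absurd rfl h
  | cons x xs => cases xs <;> simp [pvIncLast]

theorem pvStepB_ne_nil (b : List Int) (u : String) (h : b ≠ []) : pvStepB b u ≠ [] := by
  unfold pvStepB
  split
  · simp
  · exact pvIncLast_ne_nil b h

theorem pvFoldB_cons (us : List String) : ∀ (y : Int) (b : List Int), b ≠ [] →
    us.foldl pvStepB (y :: b) = y :: us.foldl pvStepB b := by
  induction us with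
  | nil => intro y b _; rfl
  | cons u rest ih =>
    intro y b hb
    simp only [List.foldl]
    have hstep : pvStepB (y :: b) u = y :: pvStepB b u := by
      unfold pvStepB
      split
      · simp
      · cases b with
        | nil => exact absurd rfl hb
        | cons h t => simp [pvIncLast]
    rw [hstep, ih y (pvStepB b u) (pvStepB_ne_nil b u hb)]

theorem pvG_ne_nil (us : List String) : pvG us ≠ [] := by
  cases us with
  | nil => simp [pvG]
  | cons u rest =>
    simp only [pvG]
    split
    · simp
    · cases h : pvG rest <;> simp [pvAddFirst]

theorem pvAddFirst_addFirst (x y : Int) (l : List Int) :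
    pvAddFirst x (pvAddFirst y l) = pvAddFirst (x + y) l := by
  cases l <;> simp [pvAddFirst] <;> ring

theorem pvFoldB_single (us : List String) : ∀ (x : Int),
    us.foldl pvStepB [x] = pvAddFirst x (pvG us) := by
  induction us with
  | nil => intro x; simp [pvG, pvAddFirst]
  | cons u rest ih =>
    intro x
    by_cases h : u = "[BOUNDARY]"
    · simp only [List.foldl]
      rw [show pvStepB [x] u = x :: [(0:Int)] from by simp [pvStepB, h],
          pvFoldB_cons rest x [0] (by simp), ih 0]
      rw [pvG, if_pos h]
      cases hg : pvG rest with
      | nil => exact absurd hg (pvG_ne_nil rest)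
      | cons a t => simp [pvAddFirst]
    · simp only [List.foldl]
      rw [show pvStepB [x] u = [x + 1] from by simp [pvStepB, pvIncLast, h],
          ih (x + 1), pvG, if_neg h, pvAddFirst_addFirst]

theorem pvA_eq_G (us : List String) : extract_label us false = pvG us := by
  unfold extract_label
  rw [pvFoldA_fst, pvFoldB_single]
  cases hg : pvG us with
  | nil => exact absurd hg (pvG_ne_nil us)
  | cons a t => simp [pvAddFirst]

theorem pvMarkerIdx_cons (u : String) (rest : List String) (k : Nat) :
    pvMarkerIdx (u :: rest) k =
      if u = "[BOUNDARY]" then (k : Int) :: pvMarkerIdx rest (k + 1) else pvMarkerIdx rest (k + 1) := by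
  simp only [pvMarkerIdx, List.zipIdx, List.filterMap]
  split <;> simp_all

theorem pvDiffs_cons_cons (a b : Int) (t : List Int) :
    pvDiffs (a :: b :: t) = (b - a - 1) :: pvDiffs (b :: t) := by
  simp [pvDiffs]

theorem pvTailpos_ne_nil (us : List String) (k : Nat) :
    pvMarkerIdx us k ++ [((k + us.length : Nat) : Int)] ≠ [] := by simp

theorem pvB_eq_G_aux (us : List String) : ∀ (k : Nat),
    pvDiffs (((k : Int) - 1) :: (pvMarkerIdx us k ++ [((k + us.length : Nat) : Int)])) = pvG us := by
  induction us with
  | nil => intro k; simp [pvMarkerIdx, pvDiffs, pvG]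
  | cons u rest ih =>
    intro k
    rw [pvMarkerIdx_cons]
    by_cases h : u = "[BOUNDARY]"
    · have hk : ((k + (u :: rest).length : Nat) : Int) = (((k+1) + rest.length : Nat) : Int) := by
        simp; omega
      rw [if_pos h, hk]
      have := ih (k + 1)
      have hkk : ((k+1 : Nat) : Int) - 1 = (k : Int) := by push_cast; ring
      rw [hkk] at this
      rw [show (((k:Int) - 1) :: (((k : Int) :: pvMarkerIdx rest (k+1)) ++ [(((k+1) + rest.length : Nat) : Int)]))
            = ((k:Int) - 1) :: ((k : Int) :: (pvMarkerIdx rest (k+1) ++ [(((k+1) + rest.length : Nat) : Int)])) from by simp,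
          pvDiffs_cons_cons, this]
      simp [pvG, h]
    · have hk : ((k + (u :: rest).length : Nat) : Int) = (((k+1) + rest.length : Nat) : Int) := by
        simp; omega
      rw [if_neg h, hk]
      have := ih (k + 1)
      have hkk : ((k+1 : Nat) : Int) - 1 = (k : Int) := by push_cast; ring
      rw [hkk] at this
      -- both lists share the nonempty tail L := pvMarkerIdx rest (k+1) ++ […]
      cases hL : pvMarkerIdx rest (k+1) ++ [(((k+1) + rest.length : Nat) : Int)] with
      | nil => exact absurd hL (pvTailpos_ne_nil rest (k+1))
      | cons a t =>
        rw [hL] at this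
        rw [pvDiffs_cons_cons] at this ⊢
        rw [pvG, if_neg h, ← this]
        simp [pvAddFirst]; ring
theorem pvB_eq_G (us : List String) : extract_label_alt us false = pvG us := by
  have := pvB_eq_G_aux us 0
  simpa [extract_label_alt] using this

-- ===== VERDICT =====
theorem extract_label_spec : Claim_equal_extract_label := by
  intro dialogue return_output _ hpre
  unfold Spec_extract_label
  unfold Pre_extract_label at hpre
  subst hpre
  rw [pvA_eq_G, pvB_eq_G]
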